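-- pv_equiv track=rewrite | github.com/recursivecurry/coding_dojo | lgecodejam/2015/b.py | solve
-- ===== SOURCE A (Python) =====
-- import operator as op
-- import bisect as bs
--
-- def possible(points, left_out, right_out, w):
--     bottom_in = points[0][1] + w
--     top_in = points[-1][1] - w
--     left_in = left_out + w
--     right_in = right_out - w
--
--     points_y = tuple(p[1] for p in points)
--     bottom_point = bs.bisect_right(points_y, points[0][1]+w)
--     top_point = bs.bisect_left(points_y, points[-1][1]-w)
--     points_without_top_bottom = points[bottom_point:top_point]
--
--     for p in points_without_top_bottom:
--         if left_in < p[0] and p[0] < right_in: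
--             return False
--     return True
--
-- def solve(n, k, w, points):
--     x_sorted_points = sorted(points, key=op.itemgetter(0, 1))
--     y_sorted_points = sorted(points, key=op.itemgetter(1, 0))
--     left_out = x_sorted_points[0][0]
--     right_out = x_sorted_points[-1][0]
--
--     for bottom_k in range(0, k+1):
--         cleaned_points = y_sorted_points[bottom_k:n-k+bottom_k]
--         if possible(cleaned_points, left_out, right_out, w):
--             return True
--         else:
--             return False
-- ===== SOURCE B (Python) =====
-- import bisect as bs
--
-- def solve(n, k, w, points):
--     cleaned = sorted(points, key=lambda p: (p[1], p[0]))[0:n - k]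
--     left_in = min(p[0] for p in points) + w
--     right_in = max(p[0] for p in points) - w
--     bottom_in = cleaned[0][1] + w
--     top_in = cleaned[-1][1] - w
--     band_xs = sorted(p[0] for p in cleaned if bottom_in < p[1] < top_in)
--     i = bs.bisect_right(band_xs, left_in)
--     return not (i < len(band_xs) and band_xs[i] < right_in)
-- ===== Notes on version B (the rewrite author's own statement) =====
-- stated objective: alternative
-- what changed: B drops the dead for-bottom_k loop, the possible() helper and A's per-point early-return scan: it takes the outer x-bounds by min/max instead of a second full sort, filters the kept window down to the points strictly inside the y-band, sorts their x-coordinates, and decides feasibility with a single binary search (bisect_right for the successor of left_in) instead of testing every point against the x-interval.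
-- outside the precondition, e.g. on solve(1, -1, 0, [(0, 0)]): A returns None, B returns True
import Mathlib
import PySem

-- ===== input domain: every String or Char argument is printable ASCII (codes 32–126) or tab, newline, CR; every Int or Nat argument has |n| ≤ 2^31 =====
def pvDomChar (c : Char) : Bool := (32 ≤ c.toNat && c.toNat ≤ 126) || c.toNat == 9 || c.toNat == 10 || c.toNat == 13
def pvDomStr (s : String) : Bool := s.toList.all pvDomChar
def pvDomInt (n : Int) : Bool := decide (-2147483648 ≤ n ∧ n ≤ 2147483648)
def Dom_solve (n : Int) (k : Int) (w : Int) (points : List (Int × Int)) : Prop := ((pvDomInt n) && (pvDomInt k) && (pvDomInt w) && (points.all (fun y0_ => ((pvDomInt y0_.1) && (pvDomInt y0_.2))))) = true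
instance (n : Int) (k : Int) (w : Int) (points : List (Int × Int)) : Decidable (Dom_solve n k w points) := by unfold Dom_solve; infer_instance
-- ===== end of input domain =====

-- B replaces A's dead loop, helper and per-point early-return scan by a filter of the
-- y-band, a sort of its x-coordinates and ONE binary search (objective: alternative).

-- ===== PORT A =====
-- the final early-return for-loop of `possible`
def possibleLoop (pts : List (Int × Int)) (left_in right_in : Int) : Bool :=
  match pts with
  | [] => true
  | p :: rest =>
      if left_in < p.1 ∧ p.1 < right_in then false
      else possibleLoop rest left_in right_in

-- points[0] / points[-1] raise IndexError on an empty list; Pre_solve excludes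
-- those inputs, so the (0, 0) default of pyGetD is never read under Pre_solve.
def possible (points : List (Int × Int)) (left_out right_out w : Int) : Bool :=
  let p0 := PySem.List.pyGetD points 0 (0, 0)
  let plast := PySem.List.pyGetD points (-1) (0, 0)
  let left_in := left_out + w
  let right_in := right_out - w
  let points_y := points.map (·.2)
  let bottom_point := PySem.List.bisectRight points_y (p0.2 + w)
  let top_point := PySem.List.bisectLeft points_y (plast.2 - w)
  let points_without_top_bottom :=
    PySem.List.slice points (some (bottom_point : Int)) (some (top_point : Int))
  possibleLoop points_without_top_bottom left_in right_in

def solve (n : Int) (k : Int) (w : Int) (points : List (Int × Int)) : Bool :=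
  let x_sorted := PySem.List.sorted2 points (·.1) (·.2)
  let y_sorted := PySem.List.sorted2 points (·.2) (·.1)
  let left_out := (PySem.List.pyGetD x_sorted 0 (0, 0)).1
  let right_out := (PySem.List.pyGetD x_sorted (-1) (0, 0)).1
  match PySem.List.pyRange 0 (k + 1) 1 with
  | [] => false   -- Python falls off the empty loop and returns None here (k < 0); outside Pre_solve
  | bottom_k :: _ =>
      let cleaned := PySem.List.slice y_sorted (some bottom_k) (some (n - k + bottom_k))
      if possible cleaned left_out right_out w then true else false

-- ===== PORT B =====
def solve_alt (n : Int) (k : Int) (w : Int) (points : List (Int × Int)) : Bool :=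
  let cleaned := PySem.List.slice (PySem.List.sorted2 points (·.2) (·.1)) (some 0) (some (n - k))
  let left_in := PySem.List.minD (points.map (·.1)) (fun x => x) 0 + w
  let right_in := PySem.List.maxD (points.map (·.1)) (fun x => x) 0 - w
  let bottom_in := (PySem.List.pyGetD cleaned 0 (0, 0)).2 + w
  let top_in := (PySem.List.pyGetD cleaned (-1) (0, 0)).2 - w
  let band_xs := PySem.List.sorted
    ((cleaned.filter (fun p => decide (bottom_in < p.2 ∧ p.2 < top_in))).map (·.1)) (fun x => x)
  let i := PySem.List.bisectRight band_xs left_in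
  !(decide (i < band_xs.length) && decide (PySem.List.pyGetD band_xs (i : Int) 0 < right_in))

-- ===== PRECONDITION & SPEC =====
-- Pre_solve holds exactly where Python A returns a bool: nonempty points (else
-- x_sorted[0] raises IndexError), 0 ≤ k (else the loop body never runs and A
-- returns None, not a bool), and a nonempty slice y_sorted[0:n-k] (else
-- possible() raises IndexError on points[0]).
def Pre_solve (n : Int) (k : Int) (w : Int) (points : List (Int × Int)) : Prop :=
  points ≠ [] ∧ 0 ≤ k ∧ (1 ≤ n - k ∨ (n - k < 0 ∧ 1 ≤ n - k + points.length))
instance (n : Int) (k : Int) (w : Int) (points : List (Int × Int)) : Decidable (Pre_solve n k w points) := by unfold Pre_solve; infer_instance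

def pvWitness_solve : Int × Int × Int × (List (Int × Int)) := (1, 0, 0, [(0, 0)])

def Spec_solve (n : Int) (k : Int) (w : Int) (points : List (Int × Int)) (out : Bool) : Prop := out = solve_alt n k w points
instance (n : Int) (k : Int) (w : Int) (points : List (Int × Int)) (out : Bool) : Decidable (Spec_solve n k w points out) := by unfold Spec_solve; infer_instance

-- ===== CLAIM (what is proved, stated in full; the proofs are below) =====
def Claim_equal_solve : Prop := ∀ (n : Int) (k : Int) (w : Int) (points : List (Int × Int)), Dom_solve n k w points → Pre_solve n k w points → Spec_solve n k w points (solve n k w points)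

-- ===== LEMMAS AND PROOFS =====

-- insertBy with a total "before" test preserves Pairwise of any transitive
-- relation it decides.
theorem insertBy_pairwise_rel {α : Type} (before : α → α → Bool) (R : α → α → Prop)
    (htr : ∀ a b c, R a b → R b c → R a c)
    (h1 : ∀ a b, before a b = true → R a b)
    (h2 : ∀ a b, before a b = false → R b a)
    (x : α) (ys : List α) (hp : ys.Pairwise R) :
    (PySem.List.insertBy before x ys).Pairwise R := by
  induction ys with
  | nil => simp [PySem.List.insertBy]
  | cons y t ih =>
      rw [List.pairwise_cons] at hp
      rw [PySem.List.insertBy.eq_2]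
      by_cases hb : before x y = true
      · simp only [hb, if_pos]
        refine List.pairwise_cons.mpr ⟨?_, List.pairwise_cons.mpr ⟨hp.1, hp.2⟩⟩
        intro z hz
        rcases List.mem_cons.mp hz with rfl | hz
        · exact h1 _ _ hb
        · exact htr _ _ _ (h1 _ _ hb) (hp.1 z hz)
      · rw [if_neg hb]
        refine List.pairwise_cons.mpr ⟨?_, ih hp.2⟩
        intro z hz
        rcases (PySem.List.mem_insertBy before x z t).mp hz with rfl | hz
        · exact h2 _ _ (Bool.eq_false_iff.mpr hb ▸ rfl)
        · exact hp.1 z hz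

theorem foldl_insertBy_pairwise {α : Type} (before : α → α → Bool) (R : α → α → Prop)
    (htr : ∀ a b c, R a b → R b c → R a c)
    (h1 : ∀ a b, before a b = true → R a b)
    (h2 : ∀ a b, before a b = false → R b a)
    (xs : List α) (acc : List α) (hacc : acc.Pairwise R) :
    (xs.foldl (fun acc x => PySem.List.insertBy before x acc) acc).Pairwise R := by
  induction xs generalizing acc with
  | nil => simpa using hacc
  | cons x t ih =>
      simp only [List.foldl_cons]
      exact ih _ (insertBy_pairwise_rel before R htr h1 h2 x acc hacc)

-- sorted2 is sorted on its primary key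
theorem sorted2_pairwise_key1 (xs : List (Int × Int)) (k1 k2 : (Int × Int) → Int) :
    (PySem.List.sorted2 xs k1 k2).Pairwise (fun a b => k1 a ≤ k1 b) := by
  unfold PySem.List.sorted2
  simp only [if_neg (by decide : ¬ (false = true))]
  apply foldl_insertBy_pairwise
  · exact fun a b c hab hbc => le_trans hab hbc
  · intro a b h
    rcases Bool.or_eq_true_iff.mp h with h' | h'
    · exact le_of_lt (of_decide_eq_true h')
    · have h2' := (Bool.and_eq_true_iff.mp h').1
      rw [Bool.not_eq_true'] at h2'
      exact not_lt.mp (of_decide_eq_false h2')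
  · intro a b h
    have h' := Bool.or_eq_false_iff.mp h
    exact not_lt.mp (of_decide_eq_false h'.1)
  · exact List.Pairwise.nil

-- the last element of a Pairwise list is related to every earlier one
theorem pairwise_getLast {α : Type} (R : α → α → Prop) (l : List α) (hp : l.Pairwise R)
    (h : l ≠ []) (y : α) (hy : y ∈ l) : y = l.getLast h ∨ R y (l.getLast h) := by
  induction l with
  | nil => exact absurd rfl h
  | cons a t ih =>
      rw [List.pairwise_cons] at hp
      cases t with
      | nil => left; simpa using hy
      | cons b t' =>
          rw [List.getLast_cons (by simp)]
          rcases List.mem_cons.mp hy with rfl | hy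
          · exact Or.inr (hp.1 _ (List.getLast_mem _))
          · exact ih hp.2 (by simp) hy

-- A's first x-sorted element carries the minimum x
theorem head_fst_eq_minD (points : List (Int × Int)) (h : points ≠ []) :
    (PySem.List.pyGetD (PySem.List.sorted2 points (·.1) (·.2)) 0 (0, 0)).1
      = PySem.List.minD (points.map (·.1)) (fun x => x) 0 := by
  have hperm := PySem.List.sorted2_perm points (·.1) (·.2) false
  have hpw := sorted2_pairwise_key1 points (·.1) (·.2)
  have hne : PySem.List.sorted2 points (·.1) (·.2) ≠ [] := fun hnil => h (by
    have := hperm.length_eq; rw [hnil] at this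
    exact List.length_eq_zero_iff.mp this.symm)
  cases hs : PySem.List.sorted2 points (·.1) (·.2) with
  | nil => exact absurd hs hne
  | cons a t =>
      rw [hs] at hperm hpw
      rw [PySem.List.pyGetD_zero_cons]
      rw [List.pairwise_cons] at hpw
      have hmapne : points.map (·.1) ≠ [] := by simp [h]
      have hmem := PySem.List.minD_mem (points.map (·.1)) (fun x => x) 0 hmapne
      rcases List.mem_map.mp hmem with ⟨q, hq, hqe⟩
      have hq' : q ∈ a :: t := hperm.mem_iff.mpr hq
      have h1 : a.1 ≤ PySem.List.minD (points.map (·.1)) (fun x => x) 0 := by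
        rcases List.mem_cons.mp hq' with rfl | hq'
        · exact le_of_eq hqe
        · exact hqe ▸ hpw.1 q hq'
      have h2 : PySem.List.minD (points.map (·.1)) (fun x => x) 0 ≤ a.1 :=
        PySem.List.minD_id_le _ _ _ (List.mem_map.mpr ⟨a, hperm.mem_iff.mp (List.mem_cons_self), rfl⟩)
      omega

-- A's last x-sorted element carries the maximum x
theorem last_fst_eq_maxD (points : List (Int × Int)) (h : points ≠ []) :
    (PySem.List.pyGetD (PySem.List.sorted2 points (·.1) (·.2)) (-1) (0, 0)).1
      = PySem.List.maxD (points.map (·.1)) (fun x => x) 0 := by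
  have hperm := PySem.List.sorted2_perm points (·.1) (·.2) false
  have hpw := sorted2_pairwise_key1 points (·.1) (·.2)
  have hne : PySem.List.sorted2 points (·.1) (·.2) ≠ [] := fun hnil => h (by
    have := hperm.length_eq; rw [hnil] at this
    exact List.length_eq_zero_iff.mp this.symm)
  rw [PySem.List.pyGetD_neg_one _ _ hne]
  have hlastmem : (PySem.List.sorted2 points (·.1) (·.2)).getLast hne ∈ points :=
    hperm.mem_iff.mp (List.getLast_mem hne)
  have hmapne : points.map (·.1) ≠ [] := by simp [h]
  have hmem := PySem.List.maxD_mem (points.map (·.1)) (fun x => x) 0 hmapne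
  rcases List.mem_map.mp hmem with ⟨q, hq, hqe⟩
  have hq' : q ∈ PySem.List.sorted2 points (·.1) (·.2) := hperm.mem_iff.mpr hq
  have h1 : q.1 ≤ ((PySem.List.sorted2 points (·.1) (·.2)).getLast hne).1 := by
    rcases pairwise_getLast _ _ hpw hne q hq' with rfl | hle
    · exact le_refl _
    · exact hle
  have h2 := PySem.List.le_maxD_id (points.map (·.1)) 0
    ((PySem.List.sorted2 points (·.1) (·.2)).getLast hne).1
    (List.mem_map.mpr ⟨_, hlastmem, rfl⟩)
  omega

theorem possibleLoop_iff (l : List (Int × Int)) (li ri : Int) :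
    possibleLoop l li ri = true ↔ ∀ p ∈ l, ¬(li < p.1 ∧ p.1 < ri) := by
  induction l with
  | nil => simp [possibleLoop]
  | cons p t ih =>
      simp only [possibleLoop]
      split_ifs with hc
      · constructor
        · intro hfalse; cases hfalse
        · intro hall; exact absurd hc (hall p List.mem_cons_self)
      · rw [ih]
        constructor
        · intro hall q hq
          rcases List.mem_cons.mp hq with rfl | hq
          · exact hc
          · exact hall q hq
        · intro hall q hq
          exact hall q (List.mem_cons_of_mem _ hq)

-- B's "successor of a is below b" test on a sorted list ≡ an element strictly between a and b
theorem bisect_hit_iff (xs : List Int) (hpw : xs.Pairwise (· ≤ ·)) (a b : Int) :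
    (decide (PySem.List.bisectRight xs a < xs.length) &&
      decide (PySem.List.pyGetD xs ((PySem.List.bisectRight xs a : Nat) : Int) 0 < b)) = true
      ↔ ∃ x ∈ xs, a < x ∧ x < b := by
  obtain ⟨hle, hlt, hge⟩ := PySem.List.bisectRight_spec xs a hpw
  rw [PySem.List.pyGetD_natCast, Bool.and_eq_true, decide_eq_true_iff, decide_eq_true_iff]
  constructor
  · rintro ⟨hilen, hib⟩
    rw [List.getD_eq_getElem _ _ hilen] at hib
    exact ⟨xs[PySem.List.bisectRight xs a], List.getElem_mem _, hge _ hilen le_rfl, hib⟩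
  · rintro ⟨x, hx, hax, hxb⟩
    rcases List.mem_iff_getElem.mp hx with ⟨m, hm, rfl⟩
    have him : PySem.List.bisectRight xs a ≤ m := by
      by_contra hcon
      exact absurd hax (not_lt.mpr (hlt m hm (Nat.lt_of_not_le hcon)))
    have hilen : PySem.List.bisectRight xs a < xs.length := lt_of_le_of_lt him hm
    refine ⟨hilen, ?_⟩
    rw [List.getD_eq_getElem _ _ hilen]
    rcases eq_or_lt_of_le him with heq | hlt'
    · subst heq; exact hxb
    · exact lt_of_le_of_lt (List.pairwise_iff_getElem.mp hpw _ m hilen hm hlt') hxb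

-- membership in A's bisect slice ≡ B's y-band test
theorem mem_bisect_slice_iff (c : List (Int × Int))
    (hpw : (c.map (·.2)).Pairwise (· ≤ ·)) (bi ti : Int) (p : Int × Int) :
    p ∈ PySem.List.slice c (some (PySem.List.bisectRight (c.map (·.2)) bi : Int))
          (some (PySem.List.bisectLeft (c.map (·.2)) ti : Int))
      ↔ p ∈ c ∧ (bi < p.2 ∧ p.2 < ti) := by
  have hlen : (c.map (·.2)).length = c.length := by simp
  obtain ⟨hbp_le, hbp_lt, hbp_ge⟩ := PySem.List.bisectRight_spec (c.map (·.2)) bi hpw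
  obtain ⟨htp_le, htp_lt, htp_ge⟩ := PySem.List.bisectLeft_spec (c.map (·.2)) ti hpw
  set bp := PySem.List.bisectRight (c.map (·.2)) bi with hbp
  set tp := PySem.List.bisectLeft (c.map (·.2)) ti with htp
  rw [PySem.List.slice_natCast]
  constructor
  · intro hp
    rcases List.mem_iff_getElem.mp hp with ⟨j, hj, hje⟩
    simp only [List.length_take, List.length_drop, lt_min_iff] at hj
    have hjc : bp + j < c.length := by omega
    rw [List.getElem_take, List.getElem_drop] at hje
    refine ⟨hje ▸ List.getElem_mem hjc, ?_, ?_⟩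
    · have hg := hbp_ge (bp + j) (by omega) (by omega)
      rwa [List.getElem_map, hje] at hg
    · have hg := htp_lt (bp + j) (by omega) (by omega)
      rwa [List.getElem_map, hje] at hg
  · rintro ⟨hmem, hb, ht⟩
    rcases List.mem_iff_getElem.mp hmem with ⟨m, hm, hme⟩
    have hbm : bp ≤ m := by
      by_contra hlt
      have hg := hbp_lt m (by omega) (by omega)
      rw [List.getElem_map, hme] at hg
      omega
    have htm : m < tp := by
      by_contra hge
      have hg := htp_ge m (by omega) (by omega)
      rw [List.getElem_map, hme] at hg
      omega
    refine List.mem_iff_getElem.mpr ⟨m - bp, ?_, ?_⟩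
    · rw [List.length_take, List.length_drop]
      exact lt_min (by omega) (by omega)
    · rw [List.getElem_take, List.getElem_drop]
      convert hme using 2
      omega

-- A's restricted scan equals B's sort-and-binary-search test
theorem core_scan (c : List (Int × Int)) (hpw : (c.map (·.2)).Pairwise (· ≤ ·))
    (bi ti li ri : Int) :
    possibleLoop (PySem.List.slice c (some (PySem.List.bisectRight (c.map (·.2)) bi : Int))
        (some (PySem.List.bisectLeft (c.map (·.2)) ti : Int))) li ri
      = !(decide (PySem.List.bisectRight (PySem.List.sorted
            ((c.filter (fun p => decide (bi < p.2 ∧ p.2 < ti))).map (·.1)) (fun x => x)) li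
            < (PySem.List.sorted ((c.filter (fun p => decide (bi < p.2 ∧ p.2 < ti))).map (·.1)) (fun x => x)).length) &&
          decide (PySem.List.pyGetD (PySem.List.sorted ((c.filter (fun p => decide (bi < p.2 ∧ p.2 < ti))).map (·.1)) (fun x => x))
            ((PySem.List.bisectRight (PySem.List.sorted ((c.filter (fun p => decide (bi < p.2 ∧ p.2 < ti))).map (·.1)) (fun x => x)) li : Nat) : Int) 0 < ri)) := by
  set xs := PySem.List.sorted ((c.filter (fun p => decide (bi < p.2 ∧ p.2 < ti))).map (·.1)) (fun x => x) with hxs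
  have hxspw : xs.Pairwise (· ≤ ·) := PySem.List.sorted_pairwise _ _
  have hmemxs : ∀ x, x ∈ xs ↔ ∃ p ∈ c, (bi < p.2 ∧ p.2 < ti) ∧ p.1 = x := by
    intro x
    rw [hxs, PySem.List.mem_sorted, List.mem_map]
    constructor
    · rintro ⟨p, hp, rfl⟩
      rcases List.mem_filter.mp hp with ⟨hpc, hband⟩
      exact ⟨p, hpc, of_decide_eq_true hband, rfl⟩
    · rintro ⟨p, hpc, hband, rfl⟩
      exact ⟨p, List.mem_filter.mpr ⟨hpc, decide_eq_true hband⟩, rfl⟩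
  have hC : (decide (PySem.List.bisectRight xs li < xs.length) &&
      decide (PySem.List.pyGetD xs ((PySem.List.bisectRight xs li : Nat) : Int) 0 < ri)) = true
      ↔ ∃ p ∈ c, (bi < p.2 ∧ p.2 < ti) ∧ (li < p.1 ∧ p.1 < ri) := by
    rw [bisect_hit_iff xs hxspw li ri]
    constructor
    · rintro ⟨x, hx, hax, hxb⟩
      rcases (hmemxs x).mp hx with ⟨p, hpc, hband, rfl⟩
      exact ⟨p, hpc, hband, hax, hxb⟩
    · rintro ⟨p, hpc, hband, hax, hxb⟩
      exact ⟨p.1, (hmemxs p.1).mpr ⟨p, hpc, hband, rfl⟩, hax, hxb⟩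
  have hL : possibleLoop (PySem.List.slice c (some (PySem.List.bisectRight (c.map (·.2)) bi : Int))
        (some (PySem.List.bisectLeft (c.map (·.2)) ti : Int))) li ri = true
      ↔ ∀ p ∈ c, ¬((bi < p.2 ∧ p.2 < ti) ∧ (li < p.1 ∧ p.1 < ri)) := by
    rw [possibleLoop_iff]
    constructor
    · rintro hall p hp ⟨hband, hx⟩
      exact hall p ((mem_bisect_slice_iff c hpw bi ti p).mpr ⟨hp, hband⟩) hx
    · intro hall p hp hx
      rcases (mem_bisect_slice_iff c hpw bi ti p).mp hp with ⟨hmem, hy⟩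
      exact hall p hmem ⟨hy, hx⟩
  cases hc : (decide (PySem.List.bisectRight xs li < xs.length) &&
      decide (PySem.List.pyGetD xs ((PySem.List.bisectRight xs li : Nat) : Int) 0 < ri)) with
  | true =>
      rcases hC.mp hc with ⟨p, hpc, hband, hx⟩
      simp only [Bool.not_true]
      rw [Bool.eq_false_iff, Ne, hL]
      intro hall
      exact hall p hpc ⟨hband, hx⟩
  | false =>
      simp only [Bool.not_false]
      rw [hL]
      intro p hp hcond
      exact absurd (hC.mpr ⟨p, hp, hcond.1, hcond.2⟩) (by rw [hc]; exact Bool.false_ne_true)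

-- the slice of a list is a sublist of it
theorem slice_sublist {α : Type} (xs : List α) (a b : Option Int) :
    (PySem.List.slice xs a b).Sublist xs := by
  unfold PySem.List.slice
  exact (List.take_sublist _ _).trans (List.drop_sublist _ _)

-- ===== VERDICT (by name: the statement is the Claim_ definition above) =====
theorem solve_spec : Claim_equal_solve := by
  intro n k w points _hdom hpre
  obtain ⟨hne, hk, _hslice⟩ := hpre
  unfold Spec_solve solve solve_alt
  rw [PySem.List.pyRange_one_cons (by omega : (0 : Int) < k + 1)]
  simp only
  rw [show n - k + 0 = n - k by ring]
  rw [head_fst_eq_minD points hne, last_fst_eq_maxD points hne]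
  unfold possible
  simp only
  rw [show ∀ (b : Bool), (if b = true then true else false) = b from fun b => by cases b <;> simp]
  apply core_scan
  refine List.pairwise_map.mpr ?_
  exact List.Pairwise.sublist (slice_sublist _ _ _) (sorted2_pairwise_key1 points (·.2) (·.1))
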